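-- pv_equiv track=rewrite | github.com/MoonLadderStudios/MoonMind | moonmind/workflows/temporal/activity_catalog.py | _skill_route_family
-- ===== SOURCE A (Python) =====
-- ARTIFACTS_FLEET = "artifacts"
--
-- LLM_FLEET = "llm"
--
-- SANDBOX_FLEET = "sandbox"
--
-- INTEGRATIONS_FLEET = "integrations"
--
-- class TemporalActivityCatalogError(ValueError):
--     """Raised when Temporal activity routing metadata is invalid."""
--
-- def _skill_route_family(required_capabilities: tuple[str, ...]) -> tuple[str, str]:
--     categories: set[str] = set()
--     integration_caps = [
--         capability
--         for capability in required_capabilities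
--         if capability.startswith("integration:")
--     ]
--     if "artifacts" in required_capabilities:
--         categories.add("artifacts")
--     if "llm" in required_capabilities:
--         categories.add("llm")
--     if "sandbox" in required_capabilities:
--         categories.add("sandbox")
--     if integration_caps:
--         categories.add("integrations")
--
--     if not categories:
--         raise TemporalActivityCatalogError(
--             "Skill definition must declare one routing capability"
--         )
--     if len(categories) > 1:
--         raise TemporalActivityCatalogError(
--             "Skill definition declares incompatible routing capabilities: "
--             + ", ".join(sorted(categories))
--         )
--
--     category = next(iter(categories))
--     if category == "artifacts":
--         return ARTIFACTS_FLEET, "artifacts"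
--     if category == "llm":
--         return LLM_FLEET, "llm"
--     if category == "sandbox":
--         return SANDBOX_FLEET, "sandbox"
--     return INTEGRATIONS_FLEET, integration_caps[0]
-- ===== SOURCE B (Python) =====
-- ARTIFACTS_FLEET = "artifacts"
-- LLM_FLEET = "llm"
-- SANDBOX_FLEET = "sandbox"
-- INTEGRATIONS_FLEET = "integrations"
--
-- class TemporalActivityCatalogError(ValueError):
--     """Raised when Temporal activity routing metadata is invalid."""
--
-- def _skill_route_family(required_capabilities):
--     categories = set()
--     first_integration = None
--     for capability in required_capabilities:
--         if capability in ("artifacts", "llm", "sandbox"):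
--             categories.add(capability)
--         elif capability.startswith("integration:"):
--             categories.add("integrations")
--             if first_integration is None:
--                 first_integration = capability
--     if not categories:
--         raise TemporalActivityCatalogError(
--             "Skill definition must declare one routing capability"
--         )
--     if len(categories) > 1:
--         raise TemporalActivityCatalogError(
--             "Skill definition declares incompatible routing capabilities: "
--             + ", ".join(sorted(categories))
--         )
--     category = categories.pop()
--     if category == "integrations":
--         return INTEGRATIONS_FLEET, first_integration
--     return category, category
-- ===== Notes on version B (the rewrite author's own statement) =====
-- stated objective: simpler
-- what changed: B classifies each capability in a single pass, accumulating the category set and the first integration capability, instead of a list comprehension plus three separate membership scans and a four-way return dispatch.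
import Mathlib
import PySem

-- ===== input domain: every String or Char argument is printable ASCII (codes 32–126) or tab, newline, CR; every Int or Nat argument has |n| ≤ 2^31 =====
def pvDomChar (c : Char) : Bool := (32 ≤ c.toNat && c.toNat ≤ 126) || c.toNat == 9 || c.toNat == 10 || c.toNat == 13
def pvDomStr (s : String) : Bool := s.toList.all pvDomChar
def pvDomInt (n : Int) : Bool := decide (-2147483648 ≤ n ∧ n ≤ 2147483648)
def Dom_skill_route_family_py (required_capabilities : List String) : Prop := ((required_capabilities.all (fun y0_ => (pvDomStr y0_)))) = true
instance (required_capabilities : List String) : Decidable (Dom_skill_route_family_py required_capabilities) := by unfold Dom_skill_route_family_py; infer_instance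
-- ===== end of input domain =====

-- B: one pass over the capabilities (classify each, record the first integration cap) instead of
-- A's list comprehension plus three separate membership scans and a four-way return dispatch; simpler, not faster.

-- ===== PORT A =====
def skill_route_family_py (required_capabilities : List String) : String × String :=
  let integration_caps := required_capabilities.filter
    (fun capability => PySem.Str.startswith capability "integration:")
  let categories : PySem.Set String := PySem.Set.empty
  let categories := if required_capabilities.contains "artifacts" then categories.add "artifacts" else categories
  let categories := if required_capabilities.contains "llm" then categories.add "llm" else categories
  let categories := if required_capabilities.contains "sandbox" then categories.add "sandbox" else categories
  let categories := if integration_caps ≠ [] then categories.add "integrations" else categories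
  if categories = [] then ("", "")            -- raise TemporalActivityCatalogError: excluded by Pre_
  else if categories.length > 1 then ("", "") -- raise TemporalActivityCatalogError: excluded by Pre_
  else
    -- next(iter(categories)) on a singleton set is its unique element
    let category := categories.headD ""
    if category = "artifacts" then ("artifacts", "artifacts")
    else if category = "llm" then ("llm", "llm")
    else if category = "sandbox" then ("sandbox", "sandbox")
    else ("integrations", integration_caps.headD "")

-- ===== PORT B =====
-- the single pass: carries (categories set, first integration capability seen)
def pvAltLoop : List String → PySem.Set String → Option String → PySem.Set String × Option String
  | [], categories, first_integration => (categories, first_integration)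
  | capability :: rest, categories, first_integration =>
    if capability = "artifacts" ∨ capability = "llm" ∨ capability = "sandbox" then
      pvAltLoop rest (categories.add capability) first_integration
    else if PySem.Str.startswith capability "integration:" then
      pvAltLoop rest (categories.add "integrations")
        (if first_integration = none then some capability else first_integration)
    else
      pvAltLoop rest categories first_integration

def skill_route_family_py_alt (required_capabilities : List String) : String × String :=
  let r := pvAltLoop required_capabilities PySem.Set.empty none
  let categories := r.1
  let first_integration := r.2
  if categories = [] then ("", "")            -- raise TemporalActivityCatalogError: excluded by Pre_
  else if categories.length > 1 then ("", "") -- raise TemporalActivityCatalogError: excluded by Pre_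
  else
    let category := categories.headD ""       -- categories.pop() on a singleton
    if category = "integrations" then ("integrations", first_integration.getD "")
    else (category, category)

-- ===== PRECONDITION & SPEC =====
-- Pre_ excludes exactly the inputs on which A raises TemporalActivityCatalogError
-- (zero routing categories, or more than one); B raises the same exception there.
def Pre_skill_route_family_py (required_capabilities : List String) : Prop :=
  (if required_capabilities.contains "artifacts" then 1 else 0)
  + (if required_capabilities.contains "llm" then 1 else 0)
  + (if required_capabilities.contains "sandbox" then 1 else 0)
  + (if required_capabilities.any (fun c => PySem.Str.startswith c "integration:") then 1 else 0)
  = (1 : Nat)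
instance (required_capabilities : List String) : Decidable (Pre_skill_route_family_py required_capabilities) := by unfold Pre_skill_route_family_py; infer_instance

def pvWitness_skill_route_family_py : List String := ["integration:github"]

def Spec_skill_route_family_py (required_capabilities : List String) (out : String × String) : Prop := out = skill_route_family_py_alt required_capabilities
instance (required_capabilities : List String) (out : String × String) : Decidable (Spec_skill_route_family_py required_capabilities out) := by unfold Spec_skill_route_family_py; infer_instance

-- ===== CLAIM (what is proved, stated in full; the proofs are below) =====
def Claim_equal_skill_route_family_py : Prop := ∀ (required_capabilities : List String), Dom_skill_route_family_py required_capabilities → Pre_skill_route_family_py required_capabilities → Spec_skill_route_family_py required_capabilities (skill_route_family_py required_capabilities)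

-- ===== LEMMAS AND PROOFS =====

-- classification of one capability: the category it contributes, if any
def pvElemCat (c : String) : Option String :=
  if c = "artifacts" ∨ c = "llm" ∨ c = "sandbox" then some c
  else if PySem.Str.startswith c "integration:" then some "integrations" else none

-- the single pass splits into a fold building the set and the first filtered integration cap
theorem pvAltLoop_eq (caps : List String) (s : PySem.Set String) (fi : Option String) :
    pvAltLoop caps s fi =
      (caps.foldl (fun acc c => match pvElemCat c with
          | some x => acc.add x
          | none => acc) s,
       fi.orElse (fun _ => (caps.filter (fun c => PySem.Str.startswith c "integration:")).head?)) := by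
  induction caps generalizing s fi with
  | nil => simp [pvAltLoop]
  | cons c rest ih =>
    simp only [pvAltLoop, List.foldl_cons, List.filter_cons]
    by_cases h1 : c = "artifacts" ∨ c = "llm" ∨ c = "sandbox"
    · have hp : PySem.Str.startswith c "integration:" = false := by
        rcases h1 with h | h | h <;> subst h <;> decide
      have he : pvElemCat c = some c := by unfold pvElemCat; rw [if_pos h1]
      rw [if_pos h1, ih, he, hp]
      simp
    · rw [if_neg h1]
      by_cases h2 : PySem.Str.startswith c "integration:" = true
      · have he : pvElemCat c = some "integrations" := by
          unfold pvElemCat; rw [if_neg h1, if_pos h2]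
        rw [if_pos h2, ih, he, h2]
        cases fi <;> simp [Option.orElse]
      · have hp : PySem.Str.startswith c "integration:" = false := by simpa using h2
        have he : pvElemCat c = none := by unfold pvElemCat; rw [if_neg h1, hp]; rfl
        rw [hp]
        simp only [Bool.false_eq_true, if_false]
        rw [ih]
        simp [he]

theorem pvFold_filterMap (caps : List String) (s : PySem.Set String) :
    caps.foldl (fun acc c => match pvElemCat c with
        | some x => acc.add x
        | none => acc) s
      = (caps.filterMap pvElemCat).foldl PySem.Set.add s := by
  induction caps generalizing s with
  | nil => rfl
  | cons c rest ih =>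
    simp only [List.foldl_cons, List.filterMap_cons]
    cases pvElemCat c <;> simp [ih]

theorem pvFoldAdd_const (X : String) (l : List String) (h : ∀ x ∈ l, x = X) :
    l.foldl PySem.Set.add [X] = [X] := by
  induction l with
  | nil => rfl
  | cons x t ih =>
    have hx : x = X := h x (by simp)
    subst hx
    simp only [List.foldl_cons]
    have hadd : PySem.Set.add [x] x = [x] := by simp [PySem.Set.add, PySem.Set.contains]
    rw [hadd]
    exact ih (fun y hy => h y (by simp [hy]))

theorem pvFoldAdd_single (X : String) (l : List String) (h : ∀ x ∈ l, x = X) (hne : l ≠ []) :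
    l.foldl PySem.Set.add ([] : PySem.Set String) = [X] := by
  cases l with
  | nil => exact absurd rfl hne
  | cons x t =>
    have hx : x = X := h x (by simp)
    subst hx
    simp only [List.foldl_cons]
    have hadd : PySem.Set.add [] x = [x] := rfl
    rw [hadd]
    exact pvFoldAdd_const x t (fun y hy => h y (by simp [hy]))

theorem pvFilterMap_all (caps : List String) (X : String)
    (h : ∀ c ∈ caps, pvElemCat c = some X ∨ pvElemCat c = none) :
    ∀ x ∈ caps.filterMap pvElemCat, x = X := by
  intro x hx
  obtain ⟨c, hc, he⟩ := List.mem_filterMap.1 hx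
  rcases h c hc with h' | h' <;> rw [he] at h' <;> simp_all

-- exactly one "simple" category X present, no integration caps: both ports return (X, X)
theorem pvMainCase (caps : List String) (X : String)
    (hX3 : X = "artifacts" ∨ X = "llm" ∨ X = "sandbox")
    (hXm : X ∈ caps)
    (ha : caps.contains "artifacts" = (X == "artifacts"))
    (hl : caps.contains "llm" = (X == "llm"))
    (hs : caps.contains "sandbox" = (X == "sandbox"))
    (hall : ∀ c ∈ caps, pvElemCat c = some X ∨ pvElemCat c = none)
    (hnoint : caps.filter (fun c => PySem.Str.startswith c "integration:") = []) :
    skill_route_family_py caps = skill_route_family_py_alt caps := by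
  have hXe : pvElemCat X = some X := by rcases hX3 with rfl | rfl | rfl <;> decide
  have hne : caps.filterMap pvElemCat ≠ [] := by
    intro h
    have hm : X ∈ caps.filterMap pvElemCat := List.mem_filterMap.2 ⟨X, hXm, hXe⟩
    rw [h] at hm
    cases hm
  have hcat : List.foldl PySem.Set.add PySem.Set.empty (caps.filterMap pvElemCat) = [X] :=
    pvFoldAdd_single X _ (pvFilterMap_all caps X hall) hne
  rcases hX3 with rfl | rfl | rfl <;>
    (simp only [skill_route_family_py, skill_route_family_py_alt, pvAltLoop_eq, pvFold_filterMap]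
     rw [ha, hl, hs, hnoint, hcat]
     decide)

-- only integration caps present: both ports return ("integrations", first integration cap)
theorem pvMainInt (caps : List String)
    (ha : caps.contains "artifacts" = false)
    (hl : caps.contains "llm" = false)
    (hs : caps.contains "sandbox" = false)
    (hi : caps.any (fun c => PySem.Str.startswith c "integration:") = true) :
    skill_route_family_py caps = skill_route_family_py_alt caps := by
  have hna : ("artifacts" : String) ∉ caps := by simpa using ha
  have hnl : ("llm" : String) ∉ caps := by simpa using hl
  have hns : ("sandbox" : String) ∉ caps := by simpa using hs
  have hall : ∀ c ∈ caps, pvElemCat c = some "integrations" ∨ pvElemCat c = none := by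
    intro c hcm
    unfold pvElemCat
    have h3 : ¬(c = "artifacts" ∨ c = "llm" ∨ c = "sandbox") := by
      rintro (rfl | rfl | rfl)
      · exact hna hcm
      · exact hnl hcm
      · exact hns hcm
    rw [if_neg h3]
    by_cases hp : PySem.Str.startswith c "integration:" = true
    · rw [if_pos hp]; left; rfl
    · rw [if_neg hp]; right; rfl
  obtain ⟨c0, hc0m, hc0p⟩ := List.any_eq_true.1 hi
  obtain ⟨a0, t0, hft⟩ : ∃ a t, caps.filter (fun c => PySem.Str.startswith c "integration:") = a :: t := by
    cases hcase : caps.filter (fun c => PySem.Str.startswith c "integration:") with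
    | nil =>
      exact absurd hc0p (by simpa using List.filter_eq_nil_iff.1 hcase c0 hc0m)
    | cons a t => exact ⟨a, t, rfl⟩
  have hc0e : pvElemCat c0 = some "integrations" := by
    unfold pvElemCat
    have h3 : ¬(c0 = "artifacts" ∨ c0 = "llm" ∨ c0 = "sandbox") := by
      rintro (rfl | rfl | rfl)
      · exact hna hc0m
      · exact hnl hc0m
      · exact hns hc0m
    rw [if_neg h3, if_pos hc0p]
  have hne : caps.filterMap pvElemCat ≠ [] := by
    intro h
    have hm : "integrations" ∈ caps.filterMap pvElemCat := List.mem_filterMap.2 ⟨c0, hc0m, hc0e⟩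
    rw [h] at hm
    cases hm
  have hcat : List.foldl PySem.Set.add PySem.Set.empty (caps.filterMap pvElemCat) = ["integrations"] :=
    pvFoldAdd_single _ _ (pvFilterMap_all caps _ hall) hne
  simp only [skill_route_family_py, skill_route_family_py_alt, pvAltLoop_eq, pvFold_filterMap]
  rw [ha, hl, hs, hft, hcat]
  simp [PySem.Set.add, PySem.Set.contains, Option.orElse]

theorem skill_route_family_py_spec : Claim_equal_skill_route_family_py := by
  intro caps _ hpre
  unfold Pre_skill_route_family_py at hpre
  unfold Spec_skill_route_family_py
  by_cases h1 : caps.contains "artifacts" = true <;>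
    by_cases h2 : caps.contains "llm" = true <;>
      by_cases h3 : caps.contains "sandbox" = true <;>
        by_cases h4 : (caps.any fun c => PySem.Str.startswith c "integration:") = true <;>
          simp only [h1, h2, h3, h4, if_pos] at hpre <;>
        try omega
  · -- only "artifacts"
    have hf1 : caps.contains "llm" = false := by simpa using h2
    have hf2 : caps.contains "sandbox" = false := by simpa using h3
    have h4f : (caps.any fun c => PySem.Str.startswith c "integration:") = false := by simpa using h4
    have hnb : ("llm" : String) ∉ caps := by simpa using hf1
    have hnc : ("sandbox" : String) ∉ caps := by simpa using hf2
    have hnp : ∀ c ∈ caps, PySem.Str.startswith c "integration:" = false := by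
      intro c hcm
      have hx := List.any_eq_false.mp h4f c hcm
      simpa using hx
    have hall : ∀ c ∈ caps, pvElemCat c = some "artifacts" ∨ pvElemCat c = none := by
      intro c hcm
      unfold pvElemCat
      by_cases hc3 : c = "artifacts" ∨ c = "llm" ∨ c = "sandbox"
      · rw [if_pos hc3]
        rcases hc3 with rfl | rfl | rfl
        · left; rfl
        · exact absurd hcm hnb
        · exact absurd hcm hnc
      · rw [if_neg hc3, hnp c hcm]
        right; rfl
    have hnoint : caps.filter (fun c => PySem.Str.startswith c "integration:") = [] := by
      rw [List.filter_eq_nil_iff]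
      intro c hcm
      simpa using hnp c hcm
    exact pvMainCase caps "artifacts" (by decide) (by simpa using h1)
      (by rw [h1]; decide) (by rw [hf1]; decide) (by rw [hf2]; decide) hall hnoint
  · -- only "llm"
    have hf1 : caps.contains "artifacts" = false := by simpa using h1
    have hf2 : caps.contains "sandbox" = false := by simpa using h3
    have h4f : (caps.any fun c => PySem.Str.startswith c "integration:") = false := by simpa using h4
    have hnb : ("artifacts" : String) ∉ caps := by simpa using hf1
    have hnc : ("sandbox" : String) ∉ caps := by simpa using hf2
    have hnp : ∀ c ∈ caps, PySem.Str.startswith c "integration:" = false := by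
      intro c hcm
      have hx := List.any_eq_false.mp h4f c hcm
      simpa using hx
    have hall : ∀ c ∈ caps, pvElemCat c = some "llm" ∨ pvElemCat c = none := by
      intro c hcm
      unfold pvElemCat
      by_cases hc3 : c = "artifacts" ∨ c = "llm" ∨ c = "sandbox"
      · rw [if_pos hc3]
        rcases hc3 with rfl | rfl | rfl
        · exact absurd hcm hnb
        · left; rfl
        · exact absurd hcm hnc
      · rw [if_neg hc3, hnp c hcm]
        right; rfl
    have hnoint : caps.filter (fun c => PySem.Str.startswith c "integration:") = [] := by
      rw [List.filter_eq_nil_iff]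
      intro c hcm
      simpa using hnp c hcm
    exact pvMainCase caps "llm" (by decide) (by simpa using h2)
      (by rw [hf1]; decide) (by rw [h2]; decide) (by rw [hf2]; decide) hall hnoint
  · -- only "sandbox"
    have hf1 : caps.contains "artifacts" = false := by simpa using h1
    have hf2 : caps.contains "llm" = false := by simpa using h2
    have h4f : (caps.any fun c => PySem.Str.startswith c "integration:") = false := by simpa using h4
    have hnb : ("artifacts" : String) ∉ caps := by simpa using hf1
    have hnc : ("llm" : String) ∉ caps := by simpa using hf2
    have hnp : ∀ c ∈ caps, PySem.Str.startswith c "integration:" = false := by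
      intro c hcm
      have hx := List.any_eq_false.mp h4f c hcm
      simpa using hx
    have hall : ∀ c ∈ caps, pvElemCat c = some "sandbox" ∨ pvElemCat c = none := by
      intro c hcm
      unfold pvElemCat
      by_cases hc3 : c = "artifacts" ∨ c = "llm" ∨ c = "sandbox"
      · rw [if_pos hc3]
        rcases hc3 with rfl | rfl | rfl
        · exact absurd hcm hnb
        · exact absurd hcm hnc
        · left; rfl
      · rw [if_neg hc3, hnp c hcm]
        right; rfl
    have hnoint : caps.filter (fun c => PySem.Str.startswith c "integration:") = [] := by
      rw [List.filter_eq_nil_iff]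
      intro c hcm
      simpa using hnp c hcm
    exact pvMainCase caps "sandbox" (by decide) (by simpa using h3)
      (by rw [hf1]; decide) (by rw [hf2]; decide) (by rw [h3]; decide) hall hnoint
  · -- only integration capabilities
    exact pvMainInt caps (by simpa using h1) (by simpa using h2) (by simpa using h3) h4
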